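-- pv_equiv track=rewrite | github.com/3pacs/OCDR | backend/app/browser/payer_validator.py | _status_equivalent
-- ===== SOURCE A (Python) =====
-- def _status_equivalent(db_status: str | None, portal_status: str) -> bool:
--     """Check if DB and portal statuses are semantically equivalent."""
--     if not db_status:
--         return portal_status in ("", "NOT_FOUND")
--
--     db_upper = db_status.upper()
--     portal_upper = portal_status.upper()
--
--     equivalents = {
--         "DENIED": {"DENIED", "REJECTED"},
--         "PENDING": {"PENDING", "IN_PROCESS", "SUBMITTED"},
--         "PAID": {"PAID", "PROCESSED", "APPROVED", "FINALIZED"},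
--         "WRITTEN_OFF": {"WRITTEN_OFF", "VOID", "VOIDED"},
--     }
--
--     for canonical, variants in equivalents.items():
--         if db_upper in variants and portal_upper in variants:
--             return True
--         if db_upper == canonical and portal_upper in variants:
--             return True
--
--     return db_upper == portal_upper
-- ===== SOURCE B (Python) =====
-- _CANON = {
--     "DENIED": "DENIED", "REJECTED": "DENIED",
--     "PENDING": "PENDING", "IN_PROCESS": "PENDING", "SUBMITTED": "PENDING",
--     "PAID": "PAID", "PROCESSED": "PAID", "APPROVED": "PAID", "FINALIZED": "PAID",
--     "WRITTEN_OFF": "WRITTEN_OFF", "VOID": "WRITTEN_OFF", "VOIDED": "WRITTEN_OFF",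
-- }
--
--
-- def _status_equivalent(db_status, portal_status):
--     """Check if DB and portal statuses are semantically equivalent."""
--     if not db_status:
--         return portal_status in ("", "NOT_FOUND")
--     db_upper = db_status.upper()
--     portal_upper = portal_status.upper()
--     return _CANON.get(db_upper, db_upper) == _CANON.get(portal_upper, portal_upper)
-- ===== Notes on version B (the rewrite author's own statement) =====
-- stated objective: simpler
-- what changed: Replaces A's scan over the four equivalence groups (two membership tests per group plus a redundant canonical check) with a single precomputed variant-to-canonical dictionary: both statuses are canonicalised by one O(1) lookup each (unknown statuses map to themselves) and compared for equality.
import Mathlib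
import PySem

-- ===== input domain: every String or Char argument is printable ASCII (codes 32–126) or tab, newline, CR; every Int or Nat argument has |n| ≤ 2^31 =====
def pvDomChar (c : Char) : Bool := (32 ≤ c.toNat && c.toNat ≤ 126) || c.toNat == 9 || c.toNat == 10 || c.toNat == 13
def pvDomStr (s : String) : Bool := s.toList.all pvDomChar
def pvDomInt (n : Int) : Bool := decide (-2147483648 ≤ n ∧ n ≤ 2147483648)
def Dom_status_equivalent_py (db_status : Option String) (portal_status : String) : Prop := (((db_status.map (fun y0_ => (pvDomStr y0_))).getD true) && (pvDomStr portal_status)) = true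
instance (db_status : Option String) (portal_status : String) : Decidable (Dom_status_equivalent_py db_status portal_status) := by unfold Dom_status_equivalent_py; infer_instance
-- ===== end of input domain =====

-- B replaces A's scan over the four equivalence groups by canonicalising both
-- statuses through one precomputed variant→canonical dictionary and comparing (simpler).

-- ===== PORT A =====
-- the `equivalents` dict of A: canonical → set of variants (sets used only for membership)
def pvEquivTable : List (String × PySem.Set String) :=
  [("DENIED", PySem.Set.ofList ["DENIED", "REJECTED"]),
   ("PENDING", PySem.Set.ofList ["PENDING", "IN_PROCESS", "SUBMITTED"]),
   ("PAID", PySem.Set.ofList ["PAID", "PROCESSED", "APPROVED", "FINALIZED"]),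
   ("WRITTEN_OFF", PySem.Set.ofList ["WRITTEN_OFF", "VOID", "VOIDED"])]

-- A's `for canonical, variants in equivalents.items():` loop with its two early returns
def pvLoopA (du pu : String) : List (String × PySem.Set String) → Bool
  | [] => du == pu
  | (c, vs) :: rest =>
    if PySem.Set.contains vs du && PySem.Set.contains vs pu then true
    else if du == c && PySem.Set.contains vs pu then true
    else pvLoopA du pu rest

def status_equivalent_py (db_status : Option String) (portal_status : String) : Bool :=
  match db_status with
  | none => portal_status == "" || portal_status == "NOT_FOUND"
  | some s =>
    if s == "" then portal_status == "" || portal_status == "NOT_FOUND"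
    else
      let du := PySem.Str.upper s
      let pu := PySem.Str.upper portal_status
      pvLoopA du pu pvEquivTable

-- ===== PORT B =====
-- B's module-level _CANON dict: variant → canonical
def pvCanon : PySem.Dict String String :=
  PySem.Dict.ofList
    [("DENIED", "DENIED"), ("REJECTED", "DENIED"),
     ("PENDING", "PENDING"), ("IN_PROCESS", "PENDING"), ("SUBMITTED", "PENDING"),
     ("PAID", "PAID"), ("PROCESSED", "PAID"), ("APPROVED", "PAID"), ("FINALIZED", "PAID"),
     ("WRITTEN_OFF", "WRITTEN_OFF"), ("VOID", "WRITTEN_OFF"), ("VOIDED", "WRITTEN_OFF")]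

def status_equivalent_py_alt (db_status : Option String) (portal_status : String) : Bool :=
  match db_status with
  | none => portal_status == "" || portal_status == "NOT_FOUND"
  | some s =>
    if s == "" then portal_status == "" || portal_status == "NOT_FOUND"
    else
      let du := PySem.Str.upper s
      let pu := PySem.Str.upper portal_status
      PySem.Dict.getD pvCanon du du == PySem.Dict.getD pvCanon pu pu

-- ===== PRECONDITION & SPEC =====
def Spec_status_equivalent_py (db_status : Option String) (portal_status : String) (out : Bool) : Prop := out = status_equivalent_py_alt db_status portal_status
instance (db_status : Option String) (portal_status : String) (out : Bool) : Decidable (Spec_status_equivalent_py db_status portal_status out) := by unfold Spec_status_equivalent_py; infer_instance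

-- ===== CLAIM (what is proved, stated in full; the proofs are below) =====
def Claim_equal_status_equivalent_py : Prop := ∀ (db_status : Option String) (portal_status : String), Dom_status_equivalent_py db_status portal_status → Spec_status_equivalent_py db_status portal_status (status_equivalent_py db_status portal_status)

-- ===== LEMMAS AND PROOFS =====

-- pvCanon, evaluated to its underlying association list
theorem pvCanon_mk : pvCanon = PySem.Dict.mk
    [("DENIED", "DENIED"), ("REJECTED", "DENIED"),
     ("PENDING", "PENDING"), ("IN_PROCESS", "PENDING"), ("SUBMITTED", "PENDING"),
     ("PAID", "PAID"), ("PROCESSED", "PAID"), ("APPROVED", "PAID"), ("FINALIZED", "PAID"),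
     ("WRITTEN_OFF", "WRITTEN_OFF"), ("VOID", "WRITTEN_OFF"), ("VOIDED", "WRITTEN_OFF")] := by
  decide

theorem pvGetEmpty : ∀ (x : String), (PySem.Dict.mk ([] : List (String × String))).get? x = none :=
  fun _ => rfl

-- every string is one of the twelve known variants, or none of them
theorem pvCases (x : String) :
    x = "DENIED" ∨ x = "REJECTED" ∨ x = "PENDING" ∨ x = "IN_PROCESS" ∨ x = "SUBMITTED" ∨
    x = "PAID" ∨ x = "PROCESSED" ∨ x = "APPROVED" ∨ x = "FINALIZED" ∨
    x = "WRITTEN_OFF" ∨ x = "VOID" ∨ x = "VOIDED" ∨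
    (x ≠ "DENIED" ∧ x ≠ "REJECTED" ∧ x ≠ "PENDING" ∧ x ≠ "IN_PROCESS" ∧ x ≠ "SUBMITTED" ∧
     x ≠ "PAID" ∧ x ≠ "PROCESSED" ∧ x ≠ "APPROVED" ∧ x ≠ "FINALIZED" ∧
     x ≠ "WRITTEN_OFF" ∧ x ≠ "VOID" ∧ x ≠ "VOIDED") := by
  tauto

set_option maxHeartbeats 2000000 in
-- the core: A's group scan equals B's canonicalise-and-compare, for all uppercased inputs
theorem pvBody_eq (u p : String) :
    pvLoopA u p pvEquivTable = (PySem.Dict.getD pvCanon u u == PySem.Dict.getD pvCanon p p) := by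
  rcases pvCases u with rfl|rfl|rfl|rfl|rfl|rfl|rfl|rfl|rfl|rfl|rfl|rfl|⟨hu1,hu2,hu3,hu4,hu5,hu6,hu7,hu8,hu9,hu10,hu11,hu12⟩ <;>
    rcases pvCases p with rfl|rfl|rfl|rfl|rfl|rfl|rfl|rfl|rfl|rfl|rfl|rfl|⟨hp1,hp2,hp3,hp4,hp5,hp6,hp7,hp8,hp9,hp10,hp11,hp12⟩ <;>
    first
    | decide
    | simp [pvLoopA, pvEquivTable, pvCanon_mk, PySem.Dict.getD_eq_get?_getD, PySem.Dict.get?_mk_cons, pvGetEmpty, PySem.Set.contains, PySem.Set.ofList, PySem.Set.add, hu1, hu2, hu3, hu4, hu5, hu6, hu7, hu8, hu9, hu10, hu11, hu12, Ne.symm hu1, Ne.symm hu2, Ne.symm hu3, Ne.symm hu4, Ne.symm hu5, Ne.symm hu6, Ne.symm hu7, Ne.symm hu8, Ne.symm hu9, Ne.symm hu10, Ne.symm hu11, Ne.symm hu12, hp1, hp2, hp3, hp4, hp5, hp6, hp7, hp8, hp9, hp10, hp11, hp12, Ne.symm hp1, Ne.symm hp2, Ne.symm hp3, Ne.symm hp4,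 Ne.symm hp5, Ne.symm hp6, Ne.symm hp7, Ne.symm hp8, Ne.symm hp9, Ne.symm hp10, Ne.symm hp11, Ne.symm hp12]
    | simp [pvLoopA, pvEquivTable, pvCanon_mk, PySem.Dict.getD_eq_get?_getD, PySem.Dict.get?_mk_cons, pvGetEmpty, PySem.Set.contains, PySem.Set.ofList, PySem.Set.add, hu1, hu2, hu3, hu4, hu5, hu6, hu7, hu8, hu9, hu10, hu11, hu12, Ne.symm hu1, Ne.symm hu2, Ne.symm hu3, Ne.symm hu4, Ne.symm hu5, Ne.symm hu6, Ne.symm hu7, Ne.symm hu8, Ne.symm hu9, Ne.symm hu10, Ne.symm hu11, Ne.symm hu12]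
    | simp [pvLoopA, pvEquivTable, pvCanon_mk, PySem.Dict.getD_eq_get?_getD, PySem.Dict.get?_mk_cons, pvGetEmpty, PySem.Set.contains, PySem.Set.ofList, PySem.Set.add, hp1, hp2, hp3, hp4, hp5, hp6, hp7, hp8, hp9, hp10, hp11, hp12, Ne.symm hp1, Ne.symm hp2, Ne.symm hp3, Ne.symm hp4, Ne.symm hp5, Ne.symm hp6, Ne.symm hp7, Ne.symm hp8, Ne.symm hp9, Ne.symm hp10, Ne.symm hp11, Ne.symm hp12]

-- ===== VERDICT (by name: the statement is the Claim_ definition above) =====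
theorem status_equivalent_py_spec : Claim_equal_status_equivalent_py := by
  intro db portal _
  unfold Spec_status_equivalent_py status_equivalent_py status_equivalent_py_alt
  cases db with
  | none => rfl
  | some s =>
    by_cases hs : s == ""
    · simp [hs]
    · simp only [hs]
      exact pvBody_eq _ _
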